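-- pv_equiv track=rewrite | github.com/Fondamenti18/fondamenti-di-programmazione | students/1792156/homework02/program02.py | estrai_dizionario_dipendenze
-- ===== SOURCE A (Python) =====
-- def estrai_dizionario_dipendenze(dizionario_esami, insi):
--     # Partendo dal dizionario completo degli esami
--     # costruiamo un nuovo dizionario. Questo sarà il dizionario che tiene conto delle dipendenze tra esami
--     dizionario_dipendenze = dict()
--     for id_esame in insi:
--         # Se è stata richiesta una chiave che non c'è nel file degli esami
--         # salta al prossimo step del ciclo
--         if not id_esame in dizionario_esami:
--             continue
--
--         dizionario_dipendenze[id_esame] = []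
--         # Se ho degli esami precedenti li accedo navigando le opportune chiavi del dizionario
--         last_esame = id_esame
--         while True:
--             esame_precedente = dizionario_esami[last_esame]
--
--             if esame_precedente is None:
--                 break
--             else:
--                 dizionario_dipendenze[id_esame].insert(0,esame_precedente)
--                 last_esame = esame_precedente
--     return dizionario_dipendenze
-- ===== SOURCE B (Python) =====
-- def estrai_dizionario_dipendenze(dizionario_esami, insi):
--     # Memoized recursive chain: each exam's prerequisite list is computed once
--     # (root-first, by concatenation) and shared between requested ids.
--     memo = {}
--
--     def chain(x):
--         if x not in memo:
--             p = dizionario_esami[x]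
--             memo[x] = [] if p is None else chain(p) + [p]
--         return memo[x]
--
--     return {i: chain(i) for i in insi if i in dizionario_esami}
-- ===== Notes on version B (the rewrite author's own statement) =====
-- stated objective: simpler
-- what changed: Replaces A's per-id while-loop that walks the predecessor pointers and builds each list by repeated insert(0,..) with a short memoized recursive helper that builds each chain root-first by concatenation and shares already-computed chains across ids via a memo dict; Pre_ excludes exactly the inputs where A raises KeyError (a chain hits a missing key) or loops forever (a cyclic predecessor chain).
import Mathlib
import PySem

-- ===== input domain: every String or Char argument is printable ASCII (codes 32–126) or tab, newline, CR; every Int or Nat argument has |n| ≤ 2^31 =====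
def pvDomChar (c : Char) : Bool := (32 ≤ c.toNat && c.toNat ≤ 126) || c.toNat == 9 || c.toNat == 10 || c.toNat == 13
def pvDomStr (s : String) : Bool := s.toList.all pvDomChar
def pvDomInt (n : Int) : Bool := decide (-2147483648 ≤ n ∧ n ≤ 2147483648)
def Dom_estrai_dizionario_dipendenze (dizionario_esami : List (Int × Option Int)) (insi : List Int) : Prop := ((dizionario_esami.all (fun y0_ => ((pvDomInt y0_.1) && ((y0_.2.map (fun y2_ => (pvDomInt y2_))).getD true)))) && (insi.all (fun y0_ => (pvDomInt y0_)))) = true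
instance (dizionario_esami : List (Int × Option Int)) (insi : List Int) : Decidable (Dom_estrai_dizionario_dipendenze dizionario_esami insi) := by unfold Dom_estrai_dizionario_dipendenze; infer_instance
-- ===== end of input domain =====

-- B replaces A's per-id backward walk with insert(0,..) by a memoized recursive chain builder
-- (shorter; chains shared across ids). Equivalence is proved on Pre_ (A returns there).

-- ===== PORT A =====
-- A's while loop: follow predecessor pointers from `last`, prepending each onto acc
-- (dizionario_dipendenze[id].insert(0, p)).  Fuel bounds the loop; under Pre_ the chain
-- terminates within `fuel` steps so the fuel-0 / missing-key branches are never reached.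
def pvChainA (de : PySem.Dict Int (Option Int)) (acc : List Int) (last : Int) : Nat → List Int
  | 0 => acc
  | fuel + 1 =>
    match de.get? last with
    | none => acc          -- KeyError in Python: excluded by Pre_
    | some none => acc     -- break
    | some (some p) => pvChainA de (p :: acc) p fuel

def estrai_dizionario_dipendenze (dizionario_esami : List (Int × Option Int)) (insi : List Int) : List (Int × List Int) :=
  let de := PySem.Dict.mk dizionario_esami
  (insi.foldl (fun dip id_esame =>
      if de.contains id_esame then
        dip.insert id_esame (pvChainA de [] id_esame (dizionario_esami.length + 1))
      else dip)
    (PySem.Dict.empty : PySem.Dict Int (List Int))).items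

-- ===== PORT B =====
-- B's chain(x): memo hit returns the stored list; otherwise look up the predecessor,
-- recurse and store chain(p) ++ [p] (or [] when None).  Fuel as in port A.
def pvChainB (de : PySem.Dict Int (Option Int)) (x : Int) (memo : PySem.Dict Int (List Int)) : Nat → List Int × PySem.Dict Int (List Int)
  | 0 => ([], memo)        -- fuel exhausted: not reached when the chain terminates
  | fuel + 1 =>
    match memo.get? x with
    | some v => (v, memo)
    | none =>
      match de.get? x with
      | none => ([], memo) -- KeyError in Python: excluded by Pre_
      | some none => ([], memo.insert x [])
      | some (some p) =>
        let r := pvChainB de p memo fuel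
        let v := r.1 ++ [p]
        (v, r.2.insert x v)

def estrai_dizionario_dipendenze_alt (dizionario_esami : List (Int × Option Int)) (insi : List Int) : List (Int × List Int) :=
  let de := PySem.Dict.mk dizionario_esami
  (insi.foldl (fun st i =>
      if de.contains i then
        let r := pvChainB de i st.2 (dizionario_esami.length + 1)
        (st.1.insert i r.1, r.2)
      else st)
    ((PySem.Dict.empty : PySem.Dict Int (List Int)), (PySem.Dict.empty : PySem.Dict Int (List Int)))).1.items

-- ===== PRECONDITION & SPEC =====
-- pvReachesRoot de x fuel: following the predecessor links from x reaches an exam with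
-- predecessor None without meeting a missing key, within `fuel` links.
def pvReachesRoot (de : PySem.Dict Int (Option Int)) (x : Int) : Nat → Bool
  | 0 => false
  | fuel + 1 =>
    match de.get? x with
    | none => false
    | some none => true
    | some (some p) => pvReachesRoot de p fuel

-- Pre_ excludes exactly the inputs on which Python A does not return: a requested id whose
-- predecessor chain hits an id that is not a key (KeyError) or never reaches None, i.e. is
-- cyclic (infinite loop).  A terminating chain visits distinct keys, so |dict|+1 links suffice.
def Pre_estrai_dizionario_dipendenze (dizionario_esami : List (Int × Option Int)) (insi : List Int) : Prop :=
  ∀ i ∈ insi, (PySem.Dict.mk dizionario_esami).contains i = true →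
    pvReachesRoot (PySem.Dict.mk dizionario_esami) i (dizionario_esami.length + 1) = true
instance (dizionario_esami : List (Int × Option Int)) (insi : List Int) : Decidable (Pre_estrai_dizionario_dipendenze dizionario_esami insi) := by unfold Pre_estrai_dizionario_dipendenze; infer_instance

def pvWitness_estrai_dizionario_dipendenze : (List (Int × Option Int)) × List Int := ([(1, none), (2, some 1), (7, some 2)], [7, 2, 5])

def Spec_estrai_dizionario_dipendenze (dizionario_esami : List (Int × Option Int)) (insi : List Int) (out : List (Int × List Int)) : Prop := out = estrai_dizionario_dipendenze_alt dizionario_esami insi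
instance (dizionario_esami : List (Int × Option Int)) (insi : List Int) (out : List (Int × List Int)) : Decidable (Spec_estrai_dizionario_dipendenze dizionario_esami insi out) := by unfold Spec_estrai_dizionario_dipendenze; infer_instance

-- ===== CLAIM (what is proved, stated in full; the proofs are below) =====
def Claim_equal_estrai_dizionario_dipendenze : Prop := ∀ (dizionario_esami : List (Int × Option Int)) (insi : List Int), Dom_estrai_dizionario_dipendenze dizionario_esami insi → Pre_estrai_dizionario_dipendenze dizionario_esami insi → Spec_estrai_dizionario_dipendenze dizionario_esami insi (estrai_dizionario_dipendenze dizionario_esami insi)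

-- ===== LEMMAS AND PROOFS =====

-- The chain value both ports compute: predecessors of x, root-first.
def pvChainSpec (de : PySem.Dict Int (Option Int)) (x : Int) : Nat → List Int
  | 0 => []
  | fuel + 1 =>
    match de.get? x with
    | some (some p) => pvChainSpec de p fuel ++ [p]
    | _ => []

theorem pvChainA_eq (de : PySem.Dict Int (Option Int)) :
    ∀ (f : Nat) (acc : List Int) (x : Int), pvChainA de acc x f = pvChainSpec de x f ++ acc := by
  intro f
  induction f with
  | zero => intro acc x; simp [pvChainA, pvChainSpec]
  | succ f ih =>
    intro acc x
    cases h : de.get? x with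
    | none => simp [pvChainA, pvChainSpec, h]
    | some o =>
      cases o with
      | none => simp [pvChainA, pvChainSpec, h]
      | some p => simp [pvChainA, pvChainSpec, h, ih]

theorem pvReachesRoot_mono (de : PySem.Dict Int (Option Int)) :
    ∀ (f g : Nat) (x : Int), f ≤ g → pvReachesRoot de x f = true → pvReachesRoot de x g = true := by
  intro f
  induction f with
  | zero => intro g x _ h; simp [pvReachesRoot] at h
  | succ f ih =>
    intro g x hle h
    obtain ⟨g, rfl⟩ : ∃ g', g = g' + 1 := ⟨g - 1, by omega⟩
    cases hd : de.get? x with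
    | none => simp [pvReachesRoot, hd] at h
    | some o =>
      cases o with
      | none => simp [pvReachesRoot, hd]
      | some p =>
        simp [pvReachesRoot, hd] at h ⊢
        exact ih g p (by omega) h

theorem pvChainSpec_stable (de : PySem.Dict Int (Option Int)) :
    ∀ (f g : Nat) (x : Int), f ≤ g → pvReachesRoot de x f = true → pvChainSpec de x g = pvChainSpec de x f := by
  intro f
  induction f with
  | zero => intro g x _ h; simp [pvReachesRoot] at h
  | succ f ih =>
    intro g x hle h
    obtain ⟨g, rfl⟩ : ∃ g', g = g' + 1 := ⟨g - 1, by omega⟩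
    cases hd : de.get? x with
    | none => simp [pvReachesRoot, hd] at h
    | some o =>
      cases o with
      | none => simp [pvChainSpec, hd]
      | some p =>
        simp [pvReachesRoot, hd] at h
        simp [pvChainSpec, hd, ih g p (by omega) h]

-- memo invariant: every stored entry is the true (terminating) chain of its key.
def pvInv (de : PySem.Dict Int (Option Int)) (N : Nat) (memo : PySem.Dict Int (List Int)) : Prop :=
  ∀ k v, memo.get? k = some v → pvReachesRoot de k N = true ∧ v = pvChainSpec de k N

theorem pvChainB_ok (de : PySem.Dict Int (Option Int)) (N : Nat) :
    ∀ (f : Nat) (x : Int) (memo : PySem.Dict Int (List Int)), f ≤ N → pvInv de N memo →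
      pvReachesRoot de x f = true →
      (pvChainB de x memo f).1 = pvChainSpec de x N ∧ pvInv de N (pvChainB de x memo f).2 := by
  intro f
  induction f with
  | zero => intro x memo _ _ h; simp [pvReachesRoot] at h
  | succ f ih =>
    intro x memo hle hinv h
    cases hm : memo.get? x with
    | some v =>
      have := hinv x v hm
      simp [pvChainB, hm, this.2, hinv]
    | none =>
      cases hd : de.get? x with
      | none => simp [pvReachesRoot, hd] at h
      | some o =>
        cases o with
        | none =>
          have hxN : pvReachesRoot de x N = true :=
            pvReachesRoot_mono de (f + 1) N x hle (by simp [pvReachesRoot, hd])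
          obtain ⟨M, rfl⟩ : ∃ M, N = M + 1 := ⟨N - 1, by omega⟩
          refine ⟨by simp [pvChainB, hm, hd, pvChainSpec], ?_⟩
          intro k v hk
          simp only [pvChainB, hm, hd] at hk
          rw [PySem.Dict.get?_insert] at hk
          by_cases hkx : k = x
          · subst hkx
            simp at hk
            exact ⟨hxN, by simp [← hk, pvChainSpec, hd]⟩
          · simp [hkx] at hk
            exact hinv k v hk
        | some p =>
          have hp : pvReachesRoot de p f = true := by simpa [pvReachesRoot, hd] using h
          have hxN : pvReachesRoot de x N = true := pvReachesRoot_mono de (f + 1) N x hle h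
          obtain ⟨M, rfl⟩ : ∃ M, N = M + 1 := ⟨N - 1, by omega⟩
          obtain ⟨ihv, ihinv⟩ := ih p memo (by omega) hinv hp
          have hchain : pvChainSpec de x (M + 1) = pvChainSpec de p (M + 1) ++ [p] := by
            have h1 : pvChainSpec de p (M + 1) = pvChainSpec de p f :=
              pvChainSpec_stable de f (M + 1) p (by omega) hp
            have h2 : pvChainSpec de p M = pvChainSpec de p f :=
              pvChainSpec_stable de f M p (by omega) hp
            have e1 : pvChainSpec de x (M + 1) = pvChainSpec de p M ++ [p] := by
              simp only [pvChainSpec, hd]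
            rw [e1, h2, ← h1]
          constructor
          · simp [pvChainB, hm, hd, ihv, hchain]
          · intro k v hk
            simp only [pvChainB, hm, hd] at hk
            rw [PySem.Dict.get?_insert] at hk
            by_cases hkx : k = x
            · subst hkx
              simp at hk
              exact ⟨hxN, by rw [← hk, ihv, hchain]⟩
            · simp [hkx] at hk
              exact ihinv k v hk

theorem pv_fold_eq (de : PySem.Dict Int (Option Int)) (N : Nat) :
    ∀ (insi : List Int) (res : PySem.Dict Int (List Int)) (memo : PySem.Dict Int (List Int)),
      pvInv de N memo →
      (∀ i ∈ insi, de.contains i = true → pvReachesRoot de i N = true) →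
      insi.foldl (fun dip id_esame =>
          if de.contains id_esame then
            dip.insert id_esame (pvChainA de [] id_esame N)
          else dip) res
        = (insi.foldl (fun st i =>
            if de.contains i then
              let r := pvChainB de i st.2 N
              (st.1.insert i r.1, r.2)
            else st) (res, memo)).1 := by
  intro insi
  induction insi with
  | nil => intro res memo _ _; rfl
  | cons i rest ih =>
    intro res memo hinv hterm
    by_cases hc : de.contains i = true
    · have ht : pvReachesRoot de i N = true := hterm i (by simp) hc
      obtain ⟨hv, hinv'⟩ := pvChainB_ok de N N i memo le_rfl hinv ht
      have ha : pvChainA de [] i N = (pvChainB de i memo N).1 := by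
        rw [pvChainA_eq, hv]; simp
      simp only [List.foldl_cons, hc, if_true, ha]
      exact ih _ _ hinv' (fun j hj => hterm j (by simp [hj]))
    · simp only [List.foldl_cons, hc]
      exact ih _ _ hinv (fun j hj => hterm j (by simp [hj]))

-- ===== VERDICT (by name: the statement is the Claim_ definition above) =====
theorem estrai_dizionario_dipendenze_spec : Claim_equal_estrai_dizionario_dipendenze := by
  intro d insi _ hpre
  unfold Spec_estrai_dizionario_dipendenze
  unfold estrai_dizionario_dipendenze estrai_dizionario_dipendenze_alt
  have h := pv_fold_eq (PySem.Dict.mk d) (d.length + 1) insi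
    (PySem.Dict.empty : PySem.Dict Int (List Int))
    (PySem.Dict.empty : PySem.Dict Int (List Int))
    (by intro k v hk; simp [PySem.Dict.get?_empty] at hk)
    hpre
  simp only [h]
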